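-- pv_equiv track=rewrite | github.com/Uzi78/GKE_Hackathon | product_service.py | _determine_cultural_filter
-- ===== SOURCE A (Python) =====
-- from typing import List, Dict, Optional
--
-- def _determine_cultural_filter(destination: str, cultural_context: Dict = None) -> str:
--     """Determine appropriate cultural filter based on destination"""
--     if not destination:
--         return None
--
--     destination_lower = destination.lower()
--
--     # Conservative destinations
--     if any(place in destination_lower for place in ['pakistan', 'saudi', 'iran', 'afghanistan']):
--         return 'conservative'
--     elif any(place in destination_lower for place in ['dubai', 'turkey', 'malaysia']):
--         return 'modest'
--     elif any(place in destination_lower for place in ['japan', 'korea', 'thailand']):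
--         return 'traditional'
--     elif any(place in destination_lower for place in ['india', 'nepal', 'tibet']):
--         return 'traditional'
--     else:
--         return 'modest'  # Default to modest for unknown destinations
-- ===== SOURCE B (Python) =====
-- # B: single left-to-right scan over the destination's suffixes with a
-- # min-priority accumulator (anchored startswith tests), instead of A's
-- # per-keyword whole-string substring searches in an if/elif chain.
-- _PRIORITY_GROUPS = [
--     (0, ('pakistan', 'saudi', 'iran', 'afghanistan')),
--     (1, ('dubai', 'turkey', 'malaysia')),
--     (2, ('japan', 'korea', 'thailand', 'india', 'nepal', 'tibet')),
-- ]
-- _CATEGORIES = {0: 'conservative', 1: 'modest', 2: 'traditional'}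
--
--
-- def _best_priority(s, acc):
--     while s:
--         for pr, kws in _PRIORITY_GROUPS:
--             if pr < acc and s.startswith(kws):
--                 acc = pr
--         s = s[1:]
--     return acc
--
--
-- def _determine_cultural_filter(destination: str, cultural_context=None) -> str:
--     if not destination:
--         return None
--     best = _best_priority(destination.lower(), 3)
--     return _CATEGORIES.get(best, 'modest')
-- ===== Notes on version B (the rewrite author's own statement) =====
-- stated objective: alternative
-- what changed: Instead of A's if/elif chain of per-keyword whole-string substring searches, B walks the lowered destination's suffixes once, at each position testing anchored startswith against priority-tagged keyword groups and keeping the minimum priority seen, then maps that priority to a category.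
import Mathlib
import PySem

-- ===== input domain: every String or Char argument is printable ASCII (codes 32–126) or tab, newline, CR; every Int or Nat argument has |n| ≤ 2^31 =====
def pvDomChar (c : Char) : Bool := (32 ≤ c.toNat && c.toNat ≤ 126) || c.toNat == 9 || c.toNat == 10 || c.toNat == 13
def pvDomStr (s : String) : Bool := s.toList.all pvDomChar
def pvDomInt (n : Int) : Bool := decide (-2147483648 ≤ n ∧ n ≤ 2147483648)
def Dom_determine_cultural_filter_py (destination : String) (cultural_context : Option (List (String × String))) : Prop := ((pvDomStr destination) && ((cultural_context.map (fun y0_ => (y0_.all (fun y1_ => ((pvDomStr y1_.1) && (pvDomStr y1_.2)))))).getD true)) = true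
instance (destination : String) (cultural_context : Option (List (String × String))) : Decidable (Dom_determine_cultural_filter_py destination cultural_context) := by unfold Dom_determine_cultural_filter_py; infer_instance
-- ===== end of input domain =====

-- B replaces A's if/elif chain of whole-string substring searches by one left-to-right
-- scan of the lowered destination's suffixes with anchored startswith tests and a
-- min-priority accumulator (alternative decomposition; same behaviour).

-- ===== PORT A =====
def determine_cultural_filter_py (destination : String) (cultural_context : Option (List (String × String))) : Option String :=
  if destination.toList = [] then none
  else
    let destination_lower := PySem.Str.lower destination
    if ["pakistan", "saudi", "iran", "afghanistan"].any (fun place => PySem.Str.isIn place destination_lower) then some "conservative"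
    else if ["dubai", "turkey", "malaysia"].any (fun place => PySem.Str.isIn place destination_lower) then some "modest"
    else if ["japan", "korea", "thailand"].any (fun place => PySem.Str.isIn place destination_lower) then some "traditional"
    else if ["india", "nepal", "tibet"].any (fun place => PySem.Str.isIn place destination_lower) then some "traditional"
    else some "modest"

-- ===== PORT B =====
-- the priority-tagged keyword groups of Source B (strings as lists of chars)
def pvG0 : List (List Char) := ["pakistan".toList, "saudi".toList, "iran".toList, "afghanistan".toList]
def pvG1 : List (List Char) := ["dubai".toList, "turkey".toList, "malaysia".toList]
def pvG2 : List (List Char) := ["japan".toList, "korea".toList, "thailand".toList, "india".toList, "nepal".toList, "tibet".toList]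

-- _best_priority: while s: for (pr, kws): if pr < acc and s.startswith(kws): acc = pr; s = s[1:]
-- (s.startswith(tuple) is true iff some member is a prefix: the .any below is exact)
def pvBestPriority : List Char → Nat → Nat
  | [], acc => acc
  | c :: t, acc =>
    let acc1 := if 0 < acc ∧ pvG0.any (fun k => PySem.Chars.startswith (c :: t) k) then 0 else acc
    let acc2 := if 1 < acc1 ∧ pvG1.any (fun k => PySem.Chars.startswith (c :: t) k) then 1 else acc1
    let acc3 := if 2 < acc2 ∧ pvG2.any (fun k => PySem.Chars.startswith (c :: t) k) then 2 else acc2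
    pvBestPriority t acc3

def determine_cultural_filter_py_alt (destination : String) (cultural_context : Option (List (String × String))) : Option String :=
  if destination.toList = [] then none
  else
    let best := pvBestPriority (PySem.Str.lower destination).toList 3
    some (PySem.Dict.getD (PySem.Dict.ofList [((0 : Int), "conservative"), (1, "modest"), (2, "traditional")]) (best : Int) "modest")

-- ===== PRECONDITION & SPEC =====
def Spec_determine_cultural_filter_py (destination : String) (cultural_context : Option (List (String × String))) (out : Option String) : Prop := out = determine_cultural_filter_py_alt destination cultural_context
instance (destination : String) (cultural_context : Option (List (String × String))) (out : Option String) : Decidable (Spec_determine_cultural_filter_py destination cultural_context out) := by unfold Spec_determine_cultural_filter_py; infer_instance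

-- ===== CLAIM (what is proved, stated in full; the proofs are below) =====
def Claim_equal_determine_cultural_filter_py : Prop := ∀ (destination : String) (cultural_context : Option (List (String × String))), Dom_determine_cultural_filter_py destination cultural_context → Spec_determine_cultural_filter_py destination cultural_context (determine_cultural_filter_py destination cultural_context)

-- ===== LEMMAS AND PROOFS =====
def pvAnyPre (kws : List (List Char)) (s : List Char) : Bool := kws.any (fun k => PySem.Chars.startswith s k)
def pvAnyIn (kws : List (List Char)) (s : List Char) : Bool := kws.any (fun k => PySem.Chars.isIn k s)
-- best priority matchable by a prefix of s
def pvQ (s : List Char) : Nat := if pvAnyPre pvG0 s then 0 else if pvAnyPre pvG1 s then 1 else if pvAnyPre pvG2 s then 2 else 3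
-- best priority matchable anywhere inside s
def pvP (s : List Char) : Nat := if pvAnyIn pvG0 s then 0 else if pvAnyIn pvG1 s then 1 else if pvAnyIn pvG2 s then 2 else 3

lemma pvP_le (s : List Char) : pvP s ≤ 3 := by unfold pvP; split_ifs <;> omega

lemma pvBestPriority_cons (c : Char) (t : List Char) (acc : Nat) (h3 : acc ≤ 3) :
    pvBestPriority (c :: t) acc = pvBestPriority t (min acc (pvQ (c :: t))) := by
  simp only [pvBestPriority]
  congr 1
  simp only [pvQ, pvAnyPre]
  split_ifs <;> simp_all <;> omega

lemma pvAnyIn_cons (kws : List (List Char)) (c : Char) (t : List Char) :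
    pvAnyIn kws (c :: t) = (pvAnyPre kws (c :: t) || pvAnyIn kws t) := by
  rw [Bool.eq_iff_iff]
  simp only [pvAnyIn, pvAnyPre, Bool.or_eq_true, List.any_eq_true,
    PySem.Chars.isIn_iff_infix, PySem.Chars.startswith_iff, List.infix_cons_iff]
  constructor
  · rintro ⟨k, hk, h | h⟩
    · exact Or.inl ⟨k, hk, h⟩
    · exact Or.inr ⟨k, hk, h⟩
  · rintro (⟨k, hk, h⟩ | ⟨k, hk, h⟩)
    · exact ⟨k, hk, Or.inl h⟩
    · exact ⟨k, hk, Or.inr h⟩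

lemma pvP_cons (c : Char) (t : List Char) :
    pvP (c :: t) = min (pvQ (c :: t)) (pvP t) := by
  simp only [pvP, pvQ, pvAnyIn_cons, Bool.or_eq_true]
  split_ifs <;> simp_all

lemma pvP_nil : pvP [] = 3 := by decide

lemma pvBestPriority_eq (s : List Char) : ∀ acc, acc ≤ 3 → pvBestPriority s acc = min acc (pvP s) := by
  induction s with
  | nil => intro acc h; simp only [pvBestPriority, pvP_nil]; omega
  | cons c t ih =>
      intro acc h
      rw [pvBestPriority_cons _ _ _ h, ih _ (le_trans (Nat.min_le_left _ _) h), pvP_cons]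
      omega

-- ===== VERDICT (by name: the statement is the Claim_ definition above) =====
theorem determine_cultural_filter_py_spec : Claim_equal_determine_cultural_filter_py := by
  intro destination cultural_context _
  unfold Spec_determine_cultural_filter_py determine_cultural_filter_py determine_cultural_filter_py_alt
  by_cases h : destination.toList = []
  · simp [h]
  · simp only [h, if_false]
    rw [pvBestPriority_eq _ 3 (by omega)]
    simp only [Nat.min_eq_right (pvP_le _)]
    simp only [pvP, pvAnyIn, pvG0, pvG1, pvG2, List.any_cons, List.any_nil,
      PySem.Str.isIn_eq, PySem.Str.toList_lower, Bool.or_false]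
    split_ifs <;> simp_all <;> rfl
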